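-- pv_equiv track=rewrite | github.com/zeomzzz/python-algorithm-study | programmers/Lv.1/17681_[1차] 비밀지도.py | solution
-- ===== SOURCE A (Python) =====
-- def solution(n, arr1, arr2):
--     answer = []
--     wid = len(arr1)
--
--     bin1 = [int(bin(i)[2:]) for i in arr1]
--     bin2 = [int(bin(j)[2:]) for j in arr2]
--
--     bin_sum = [str(x + y) for x, y in zip(bin1, bin2)]
--
--     for k in range(wid) :
--         while len(bin_sum[k]) < wid :
--             bin_sum[k] = "0" + bin_sum[k]
--
--     for l in bin_sum :
--         solved = ''
--         for m in l :
--             if int(m) > 0 :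
--                 solved += "#"
--             else :
--                 solved += " "
--         answer.append(solved)
--
--     return answer
-- ===== SOURCE B (Python) =====
-- def solution(n, arr1, arr2):
--     w = len(arr1)
--     return [''.join('#' if c == '1' else ' ' for c in format(a | b, 'b').zfill(w))
--             for a, b in zip(arr1, arr2)]
-- ===== Notes on version B (the rewrite author's own statement) =====
-- stated objective: idiomatic
-- what changed: B replaces A's decimal-addition-of-binary-strings trick (int(bin(x)[2:]) + int(bin(y)[2:]), string-padded in an index loop, then a per-character int() test) by the direct bitwise OR per row, formatted with format(_, 'b').zfill(w) and a one-pass character translation.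
import Mathlib
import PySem

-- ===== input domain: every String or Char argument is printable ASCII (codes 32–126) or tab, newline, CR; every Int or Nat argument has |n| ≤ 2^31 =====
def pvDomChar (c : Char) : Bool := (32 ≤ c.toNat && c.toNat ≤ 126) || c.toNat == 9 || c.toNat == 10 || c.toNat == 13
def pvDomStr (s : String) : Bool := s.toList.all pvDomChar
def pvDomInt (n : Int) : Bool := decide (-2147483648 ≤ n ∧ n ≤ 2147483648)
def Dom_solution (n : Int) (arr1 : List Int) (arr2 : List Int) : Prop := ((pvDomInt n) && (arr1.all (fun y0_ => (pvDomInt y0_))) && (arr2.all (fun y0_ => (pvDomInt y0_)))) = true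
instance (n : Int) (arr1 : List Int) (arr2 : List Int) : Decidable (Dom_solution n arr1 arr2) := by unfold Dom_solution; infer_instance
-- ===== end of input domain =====

-- B renders each row as the bitwise OR formatted in binary, zero-filled and translated in one
-- pass, instead of A's decimal addition of binary digit strings (neither version mutates its
-- arguments; the claim is about the return value).

-- ===== PORT A =====
-- `int(bin(i)[2:])` is ported by hand: for the inputs Pre_ admits (i ≥ 0) the slice of
-- bin(i) (= PySem.Int.toBinChars0b) is a nonempty all-digit string, and `pvReadDec` is
-- exactly Python's int() on such strings.
def pvReadDec (ds : List Char) : Int :=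
  Int.ofNat (ds.foldl (fun a c => a * 10 + (c.toNat - 48)) 0)

def pvBinDec (i : Int) : Int :=
  pvReadDec (PySem.List.slice (PySem.Int.toBinChars0b i) (some 2) none)

-- the `while len(bin_sum[k]) < wid : bin_sum[k] = "0" + bin_sum[k]` loop
def pvPadW (wid : Nat) (s : List Char) : List Char :=
  if s.length < wid then pvPadW wid ('0' :: s) else s
termination_by wid - s.length
decreasing_by simp_all; omega

-- `int(m)` for a single char m: exact on the digit chars that reach it
def pvCharVal (m : Char) : Int := Int.ofNat (m.toNat - 48)

def solution (n : Int) (arr1 : List Int) (arr2 : List Int) : List String :=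
  let wid : Int := arr1.length
  let bin1 := arr1.map pvBinDec
  let bin2 := arr2.map pvBinDec
  let binSum := (bin1.zip bin2).map (fun p => PySem.Int.toChars (p.1 + p.2))
  let padded := (PySem.List.pyRange 0 wid 1).foldl
      (fun bs k => PySem.List.pySetD bs k (pvPadW wid.toNat (PySem.List.pyGetD bs k []))) binSum
  padded.map (fun l =>
    String.ofList (l.foldl (fun solved m => solved ++ (if pvCharVal m > 0 then ['#'] else [' '])) []))

-- ===== PORT B =====
def pvZfill (w : Nat) (s : List Char) : List Char := List.replicate (w - s.length) '0' ++ s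

def solution_alt (n : Int) (arr1 : List Int) (arr2 : List Int) : List String :=
  (arr1.zip arr2).map (fun p =>
    String.ofList ((pvZfill arr1.length (PySem.Int.toBinChars (PySem.Int.bor p.1 p.2))).map
      (fun c => if c = '1' then '#' else ' ')))

-- ===== PRECONDITION & SPEC =====
-- Pre_ excludes exactly the inputs where A raises: a negative entry in either list makes
-- int(bin(i)[2:]) raise ValueError, and len(arr2) < len(arr1) makes the padding loop
-- raise IndexError (bin_sum, truncated by zip, is shorter than wid).
def Pre_solution (n : Int) (arr1 : List Int) (arr2 : List Int) : Prop :=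
  (∀ x ∈ arr1, 0 ≤ x) ∧ (∀ x ∈ arr2, 0 ≤ x) ∧ arr1.length ≤ arr2.length

instance (n : Int) (arr1 : List Int) (arr2 : List Int) : Decidable (Pre_solution n arr1 arr2) := by
  unfold Pre_solution; infer_instance

def pvWitness_solution : Int × List Int × List Int := (1, [9, 20], [30, 1])

def Spec_solution (n : Int) (arr1 : List Int) (arr2 : List Int) (out : List String) : Prop := out = solution_alt n arr1 arr2
instance (n : Int) (arr1 : List Int) (arr2 : List Int) (out : List String) : Decidable (Spec_solution n arr1 arr2 out) := by unfold Spec_solution; infer_instance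

-- ===== CLAIM (what is proved, stated in full; the proofs are below) =====
def Claim_equal_solution : Prop := ∀ (n : Int) (arr1 : List Int) (arr2 : List Int), Dom_solution n arr1 arr2 → Pre_solution n arr1 arr2 → Spec_solution n arr1 arr2 (solution n arr1 arr2)

-- ===== LEMMAS AND PROOFS =====

-- digit lists (least-significant first) for the carry-free addition / bitwise OR
def pvZipAdd : List Nat → List Nat → List Nat
  | [], v => v
  | u, [] => u
  | x :: u, y :: v => (x + y) :: pvZipAdd u v

def pvZipOr : List Nat → List Nat → List Nat
  | [], v => v
  | u, [] => u
  | x :: u, y :: v => (x ||| y) :: pvZipOr u v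

theorem pvToDigitsCore_eq (b : Nat) (hb : 2 ≤ b) :
    ∀ (f n : Nat) (ds : List Char), 0 < n → n ≤ f →
      Nat.toDigitsCore b f n ds = ((Nat.digits b n).map Nat.digitChar).reverse ++ ds := by
  intro f
  induction f with
  | zero => intro n ds h1 h2; omega
  | succ f ih =>
    intro n ds h1 h2
    rw [Nat.toDigitsCore]
    have hdig : Nat.digits b n = n % b :: Nat.digits b (n / b) :=
      Nat.digits_def' (by omega) h1
    by_cases hq : n / b = 0
    · simp [hq, hdig]
    · have hlt : n / b < n := Nat.div_lt_self h1 (by omega)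
      rw [if_neg hq, ih (n / b) _ (Nat.pos_of_ne_zero hq) (by omega)]
      simp [hdig]

theorem pvToDigits_eq {b n : Nat} (hb : 2 ≤ b) (hn : n ≠ 0) :
    Nat.toDigits b n = ((Nat.digits b n).map Nat.digitChar).reverse := by
  rw [Nat.toDigits, pvToDigitsCore_eq b hb (n+1) n [] (by omega) (by omega), List.append_nil]

theorem pvDigitChar_val {d : Nat} (h : d < 10) : (Nat.digitChar d).toNat - 48 = d := by
  interval_cases d <;> decide

theorem pvFold_dec (ds : List Nat) (h : ∀ d ∈ ds, d < 10) (acc : Nat) :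
    ((ds.map Nat.digitChar).reverse).foldl (fun a c => a * 10 + (c.toNat - 48)) acc
      = Nat.ofDigits 10 ds + acc * 10 ^ ds.length := by
  induction ds generalizing acc with
  | nil => simp
  | cons d ds ih =>
    simp only [List.map_cons, List.reverse_cons, List.foldl_append, List.foldl_cons, List.foldl_nil]
    rw [ih (fun x hx => h x (List.mem_cons_of_mem _ hx)) acc]
    rw [pvDigitChar_val (h d List.mem_cons_self)]
    rw [Nat.ofDigits_cons]
    simp only [List.length_cons, pow_succ]
    ring

theorem pvBinDec_eq {a : Int} (ha : 0 ≤ a) :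
    pvBinDec a = Int.ofNat (Nat.ofDigits 10 (Nat.digits 2 a.toNat)) := by
  unfold pvBinDec
  rw [PySem.Int.toBinChars0b, if_neg (by omega)]
  rw [show (2:Int) = ((2:Nat):Int) from rfl, PySem.List.slice_from_natCast]
  simp only [List.drop_succ_cons, List.drop_zero]
  rcases Nat.eq_zero_or_pos a.toNat with h0 | hpos
  · rw [h0]; decide
  · rw [pvToDigits_eq (le_refl 2) (by omega)]
    unfold pvReadDec
    rw [pvFold_dec _ (fun d hd => lt_trans (Nat.digits_lt_base (by norm_num) hd) (by norm_num)) 0]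
    simp

theorem pvZipAdd_ofDigits (u : List Nat) : ∀ v : List Nat,
    Nat.ofDigits 10 (pvZipAdd u v) = Nat.ofDigits 10 u + Nat.ofDigits 10 v := by
  induction u with
  | nil => intro v; simp [pvZipAdd]
  | cons x u ih =>
    intro v
    cases v with
    | nil => simp [pvZipAdd]
    | cons y v =>
      simp only [pvZipAdd, Nat.ofDigits_cons, ih]
      ring

theorem pvZipAdd_lt (u : List Nat) : ∀ (v : List Nat), (∀ d ∈ u, d < 2) → (∀ d ∈ v, d < 2) →
    ∀ d ∈ pvZipAdd u v, d < 10 := by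
  induction u with
  | nil => intro v _ hv d hd; exact lt_trans (hv d hd) (by norm_num)
  | cons x u ih =>
    intro v hu hv d hd
    cases v with
    | nil => exact lt_trans (hu d hd) (by norm_num)
    | cons y v =>
      simp only [pvZipAdd, List.mem_cons] at hd
      rcases hd with rfl | hd
      · have := hu x List.mem_cons_self; have := hv y List.mem_cons_self; omega
      · exact ih v (fun z hz => hu z (List.mem_cons_of_mem _ hz))
          (fun z hz => hv z (List.mem_cons_of_mem _ hz)) d hd

theorem pvZipAdd_nil_iff (u v : List Nat) : pvZipAdd u v = [] ↔ u = [] ∧ v = [] := by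
  cases u <;> cases v <;> simp [pvZipAdd]

theorem pvZipOr_nil_iff (u v : List Nat) : pvZipOr u v = [] ↔ u = [] ∧ v = [] := by
  cases u <;> cases v <;> simp [pvZipOr]

theorem pvZipAdd_last (u : List Nat) : ∀ v : List Nat, u.getLast? ≠ some 0 → v.getLast? ≠ some 0 →
    (pvZipAdd u v).getLast? ≠ some 0 := by
  induction u with
  | nil => intro v _ hv; simpa [pvZipAdd]
  | cons x u ih =>
    intro v hu hv
    cases v with
    | nil => simpa [pvZipAdd] using hu
    | cons y v =>
      simp only [pvZipAdd]
      by_cases hz : pvZipAdd u v = []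
      · rcases (pvZipAdd_nil_iff u v).mp hz with ⟨rfl, rfl⟩
        simp only [List.getLast?_singleton, pvZipAdd] at hu hv ⊢
        intro hcon
        simp at hcon hu hv
        omega
      · rw [show ((x + y) :: pvZipAdd u v).getLast? = (pvZipAdd u v).getLast? from by
          rcases (List.exists_cons_of_ne_nil hz) with ⟨a, w, hw⟩
          rw [hw, List.getLast?_cons_cons]]
        apply ih
        · cases u with
          | nil => simp
          | cons a u' => rwa [List.getLast?_cons_cons] at hu
        · cases v with
          | nil => simp
          | cons a v' => rwa [List.getLast?_cons_cons] at hv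

theorem pvDigits_lor (A : Nat) : ∀ B : Nat,
    Nat.digits 2 (A ||| B) = pvZipOr (Nat.digits 2 A) (Nat.digits 2 B) := by
  induction A using Nat.strong_induction_on with
  | _ A ih =>
    intro B
    rcases Nat.eq_zero_or_pos A with rfl | hA
    · simp [pvZipOr]
    rcases Nat.eq_zero_or_pos B with rfl | hB
    · cases h : Nat.digits 2 A <;> simp [pvZipOr, h]
    have hor : 0 < (A ||| B) := Nat.lt_of_lt_of_le hA Nat.left_le_or
    rw [Nat.digits_def' (by norm_num : 1 < 2) hor,
        Nat.digits_def' (by norm_num : 1 < 2) hA,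
        Nat.digits_def' (by norm_num : 1 < 2) hB]
    simp only [pvZipOr]
    rw [Nat.or_div_two, ih (A / 2) (Nat.div_lt_self hA (by norm_num)) (B / 2)]
    congr 1
    have e1 : A % 2 = (A &&& 1) := (Nat.and_one_is_mod A).symm
    have e2 : B % 2 = (B &&& 1) := (Nat.and_one_is_mod B).symm
    have e3 : (A ||| B) % 2 = ((A ||| B) &&& 1) := (Nat.and_one_is_mod _).symm
    rw [e1, e2, e3, Nat.and_or_distrib_right]

theorem pvZip_map_tr_entry {x y : Nat} (hx : x < 2) (hy : y < 2) :
    (if pvCharVal (Nat.digitChar (x + y)) > 0 then '#' else ' ')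
      = (if Nat.digitChar (x ||| y) = '1' then '#' else ' ') := by
  interval_cases x <;> interval_cases y <;> decide

theorem pvTr_entry_single {x : Nat} (hx : x < 2) :
    (if pvCharVal (Nat.digitChar x) > 0 then '#' else ' ')
      = (if Nat.digitChar x = '1' then '#' else ' ') := by
  interval_cases x <;> decide

theorem pvZip_map_tr (u : List Nat) : ∀ v : List Nat,
    (∀ d ∈ u, d < 2) → (∀ d ∈ v, d < 2) →
    (pvZipAdd u v).map (fun d => if pvCharVal (Nat.digitChar d) > 0 then '#' else ' ')
      = (pvZipOr u v).map (fun d => if Nat.digitChar d = '1' then '#' else ' ') := by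
  induction u with
  | nil =>
    intro v _ hv
    simp only [pvZipAdd, pvZipOr]
    exact List.map_congr_left fun d hd => pvTr_entry_single (hv d hd)
  | cons x u ih =>
    intro v hu hv
    cases v with
    | nil =>
      simp only [pvZipAdd, pvZipOr]
      exact List.map_congr_left fun d hd => pvTr_entry_single (hu d hd)
    | cons y v =>
      simp only [pvZipAdd, pvZipOr, List.map_cons]
      rw [pvZip_map_tr_entry (hu x List.mem_cons_self) (hv y List.mem_cons_self),
          ih v (fun z hz => hu z (List.mem_cons_of_mem _ hz))
               (fun z hz => hv z (List.mem_cons_of_mem _ hz))]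

theorem pvPadW_eq (w : Nat) (s : List Char) :
    pvPadW w s = List.replicate (w - s.length) '0' ++ s := by
  by_cases h : s.length < w
  · rw [pvPadW, if_pos h, pvPadW_eq w ('0' :: s)]
    rw [show w - s.length = (w - ('0'::s).length) + 1 from by simp; omega]
    rw [List.replicate_succ']
    simp
  · rw [pvPadW, if_neg h, show w - s.length = 0 from by omega]
    simp
termination_by w - s.length
decreasing_by simp_all; omega

-- the per-row equality
theorem pvRow_eq (w : Nat) (a b : Int) (ha : 0 ≤ a) (hb : 0 ≤ b) :
    (pvPadW w (PySem.Int.toChars (pvBinDec a + pvBinDec b))).map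
        (fun m => if pvCharVal m > 0 then '#' else ' ')
      = (pvZfill w (PySem.Int.toBinChars (PySem.Int.bor a b))).map
        (fun c => if c = '1' then '#' else ' ') := by
  set A := a.toNat with hA
  set B := b.toNat with hB
  set u := Nat.digits 2 A with husrc
  set v := Nat.digits 2 B with hvsrc
  have hu2 : ∀ d ∈ u, d < 2 := fun d hd => Nat.digits_lt_base (by norm_num) hd
  have hv2 : ∀ d ∈ v, d < 2 := fun d hd => Nat.digits_lt_base (by norm_num) hd
  have hsum : pvBinDec a + pvBinDec b = Int.ofNat (Nat.ofDigits 10 (pvZipAdd u v)) := by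
    rw [pvBinDec_eq ha, pvBinDec_eq hb, pvZipAdd_ofDigits, husrc, hvsrc]
    simp only [Int.ofNat_eq_natCast, hA, hB]
    push_cast
    ring
  have hbor : PySem.Int.bor a b = Int.ofNat (A ||| B) := PySem.Int.bor_of_nonneg ha hb
  rw [hsum, hbor]
  rw [PySem.Int.toChars, if_neg (by exact not_lt.mpr (Int.natCast_nonneg _))]
  rw [PySem.Int.toBinChars, if_neg (by exact not_lt.mpr (Int.natCast_nonneg _))]
  simp only [Int.ofNat_eq_natCast, Int.toNat_natCast]
  by_cases hz : pvZipAdd u v = []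
  · rcases (pvZipAdd_nil_iff u v).mp hz with ⟨hu0, hv0⟩
    have hA0 : A = 0 := by
      by_contra h
      exact (Nat.digits_ne_nil_iff_ne_zero.mpr h) (by rw [← husrc, hu0])
    have hB0 : B = 0 := by
      by_contra h
      exact (Nat.digits_ne_nil_iff_ne_zero.mpr h) (by rw [← hvsrc, hv0])
    rw [hz, hA0, hB0]
    show (pvPadW w (Nat.toDigits 10 0)).map _ = (pvZfill w (Nat.toDigits 2 0)).map _
    rw [show Nat.toDigits 10 0 = ['0'] from rfl, show Nat.toDigits 2 0 = ['0'] from rfl]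
    rw [pvPadW_eq, pvZfill]
    simp [List.map_replicate, show pvCharVal '0' = 0 from rfl]
  · have hlastu : u.getLast? ≠ some 0 := by
      cases hul : u with
      | nil => simp
      | cons d l =>
        have hne : u ≠ [] := by rw [hul]; simp
        have hA0 : A ≠ 0 := fun h => hne (by rw [husrc, h]; simp)
        rw [← hul, List.getLast?_eq_getLast hne]
        intro hcon
        exact Nat.getLast_digit_ne_zero 2 hA0 (by simpa using hcon)
    have hlastv : v.getLast? ≠ some 0 := by
      cases hvl : v with
      | nil => simp
      | cons d l =>
        have hne : v ≠ [] := by rw [hvl]; simp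
        have hB0 : B ≠ 0 := fun h => hne (by rw [hvsrc, h]; simp)
        rw [← hvl, List.getLast?_eq_getLast hne]
        intro hcon
        exact Nat.getLast_digit_ne_zero 2 hB0 (by simpa using hcon)
    have hdig : Nat.digits 10 (Nat.ofDigits 10 (pvZipAdd u v)) = pvZipAdd u v :=
      Nat.digits_ofDigits 10 (by norm_num) _ (pvZipAdd_lt u v hu2 hv2)
        (fun h hcon => pvZipAdd_last u v hlastu hlastv
          (by rw [List.getLast?_eq_getLast h, hcon]))
    have hS0 : Nat.ofDigits 10 (pvZipAdd u v) ≠ 0 := by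
      intro h
      rw [h] at hdig
      exact hz (by simpa using hdig.symm)
    have hOr0 : (A ||| B) ≠ 0 := by
      intro h
      have h2 := pvDigits_lor A B
      rw [h] at h2
      simp only [Nat.digits_zero] at h2
      rcases (pvZipOr_nil_iff u v).mp (by rw [husrc, hvsrc, ← h2]) with ⟨hu0, hv0⟩
      exact hz ((pvZipAdd_nil_iff u v).mpr ⟨hu0, hv0⟩)
    rw [pvToDigits_eq (le_refl 2) hOr0, pvToDigits_eq (b := 10) (by norm_num) hS0, hdig,
        pvDigits_lor A B]
    rw [pvPadW_eq, pvZfill]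
    have hmap := pvZip_map_tr u v hu2 hv2
    have hlen : (pvZipAdd u v).length = (pvZipOr u v).length := by
      have := congrArg List.length hmap
      simpa using this
    simp only [List.map_append, List.map_reverse, List.map_map, List.map_replicate,
      List.length_reverse, List.length_map]
    rw [hlen]
    congr 1
    rw [← husrc, ← hvsrc]
    simpa [Function.comp] using hmap

-- the index/set padding loop is a map
theorem pvPadLoop (f : List Char → List Char) :
    ∀ (m : Nat) (xs : List (List Char)), m ≤ xs.length →
      (PySem.List.pyRange 0 (m : Int) 1).foldl
          (fun bs k => PySem.List.pySetD bs k (f (PySem.List.pyGetD bs k []))) xs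
        = (xs.take m).map f ++ xs.drop m := by
  intro m
  induction m with
  | zero => intro xs h; simp [PySem.List.pyRange_one_eq_nil]
  | succ m ih =>
    intro xs h
    rw [show ((m + 1 : Nat) : Int) = (m : Int) + 1 from by push_cast; ring]
    rw [PySem.List.pyRange_one_succ_right (by positivity)]
    rw [List.foldl_append]
    rw [ih xs (by omega)]
    simp only [List.foldl_cons, List.foldl_nil]
    have hm : m < xs.length := by omega
    have hlen1 : ((xs.take m).map f).length = m := by
      simp [List.length_take, Nat.min_eq_left (le_of_lt hm)]
    have hget : PySem.List.pyGetD ((xs.take m).map f ++ xs.drop m) (m : Int) [] = xs[m] := by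
      rw [PySem.List.pyGetD_natCast]
      rw [List.getD_eq_getElem?_getD]
      rw [List.getElem?_append_right (by omega)]
      rw [hlen1]
      simp [hm]
    rw [hget, PySem.List.pySetD_natCast]
    rw [List.set_append_right _ _ (by omega)]
    rw [hlen1, Nat.sub_self]
    rw [List.drop_eq_getElem_cons hm]
    rw [List.set_cons_zero]
    rw [List.take_add_one, List.map_append]
    simp [List.getElem?_eq_getElem hm, List.append_assoc]

theorem pvFoldTr (l : List Char) : ∀ acc : List Char,
    l.foldl (fun solved m => solved ++ (if pvCharVal m > 0 then ['#'] else [' '])) acc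
      = acc ++ l.map (fun m => if pvCharVal m > 0 then '#' else ' ') := by
  induction l with
  | nil => intro acc; simp
  | cons c l ih =>
    intro acc
    simp only [List.foldl_cons, List.map_cons, ih]
    by_cases h : pvCharVal c > 0 <;> simp [h]

-- ===== VERDICT (by name: the statement is the Claim_ definition above) =====
theorem solution_spec : Claim_equal_solution := by
  intro n arr1 arr2 _hdom hpre
  obtain ⟨h1, h2, hlen⟩ := hpre
  show solution n arr1 arr2 = solution_alt n arr1 arr2
  rw [solution, solution_alt]
  rw [List.zip_map]
  rw [List.map_map]
  have hbs : ((arr1.zip arr2).map ((fun p => PySem.Int.toChars (p.1 + p.2)) ∘ Prod.map pvBinDec pvBinDec)).length = arr1.length := by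
    simp [List.length_zip]
    omega
  rw [show ((arr1.length : Int)) = (((arr1.zip arr2).map ((fun p => PySem.Int.toChars (p.1 + p.2)) ∘ Prod.map pvBinDec pvBinDec)).length : Int) from by rw [hbs]]
  rw [show (((arr1.zip arr2).map ((fun p => PySem.Int.toChars (p.1 + p.2)) ∘ Prod.map pvBinDec pvBinDec)).length : Int).toNat = arr1.length from by simp [hbs]]
  rw [pvPadLoop (pvPadW arr1.length) _ _ (le_refl _)]
  rw [List.take_length, List.drop_length, List.append_nil]
  simp only [List.map_map]
  apply List.map_congr_left
  intro p hp
  obtain ⟨hpa, hpb⟩ := List.of_mem_zip hp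
  simp only [Function.comp, Prod.map_fst, Prod.map_snd]
  rw [pvFoldTr _ [], List.nil_append]
  rw [pvRow_eq arr1.length p.1 p.2 (h1 p.1 hpa) (h2 p.2 hpb)]
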